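-- pv_equiv track=rewrite | github.com/yogeshhk/TeachingDataScience | Code/InterviewPrep/course-material-software-tudelft/implementation/exercises/week1/even_before_odd/testsuite.py | correct_order
-- ===== SOURCE A (Python) =====
-- from typing import List
--
-- def correct_order(xs: List[int]) -> bool:
--     odd = False
--     for x in range(len(xs)):
--         if xs[x] % 2:
--             odd = True
--         elif odd:
--             return False
--     return True
-- ===== SOURCE B (Python) =====
-- from typing import List
--
-- def correct_order(xs: List[int]) -> bool:
--     p = [x % 2 for x in xs]
--     return p == sorted(p)
-- ===== Notes on version B (the rewrite author's own statement) =====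
-- stated objective: idiomatic
-- what changed: Replaces the stateful odd-flag scan with early return by materializing the parity list and comparing it to its sorted version (evens-before-odds iff the 0/1 parity list is already sorted).
import Mathlib
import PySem

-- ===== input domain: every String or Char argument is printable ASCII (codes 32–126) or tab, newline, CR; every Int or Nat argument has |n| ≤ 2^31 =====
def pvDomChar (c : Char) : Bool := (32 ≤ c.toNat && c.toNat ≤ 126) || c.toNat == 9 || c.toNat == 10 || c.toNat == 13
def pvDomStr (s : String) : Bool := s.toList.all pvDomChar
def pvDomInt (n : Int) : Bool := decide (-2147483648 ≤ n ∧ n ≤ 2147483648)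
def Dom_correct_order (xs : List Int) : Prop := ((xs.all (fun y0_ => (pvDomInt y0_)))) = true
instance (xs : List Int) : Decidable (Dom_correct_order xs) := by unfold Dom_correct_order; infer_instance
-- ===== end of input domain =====

-- B replaces A's stateful odd-flag early-return scan by "parity list equals its sorted self" (idiomatic, not faster).


-- ===== PORT A =====
-- loop over the elements carrying the 'odd' flag; early return False becomes returning false
def correctOrderLoop : List Int → Bool → Bool
  | [], _ => true
  | x :: rest, odd =>
    if PySem.Int.mod x 2 ≠ 0 then correctOrderLoop rest true
    else if odd then false
    else correctOrderLoop rest odd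

def correct_order (xs : List Int) : Bool := correctOrderLoop xs false

-- ===== PORT B =====
def correct_order_alt (xs : List Int) : Bool :=
  let p := xs.map (fun x => PySem.Int.mod x 2)
  decide (p = PySem.List.sorted p (fun x => x) false)

-- ===== PRECONDITION & SPEC =====
def Spec_correct_order (xs : List Int) (out : Bool) : Prop := out = correct_order_alt xs
instance (xs : List Int) (out : Bool) : Decidable (Spec_correct_order xs out) := by unfold Spec_correct_order; infer_instance

-- ===== CLAIM (what is proved, stated in full; the proofs are below) =====
def Claim_equal_correct_order : Prop := ∀ (xs : List Int), Dom_correct_order xs → Spec_correct_order xs (correct_order xs)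

-- ===== LEMMAS AND PROOFS =====

theorem pv_mod2_cases (x : Int) : PySem.Int.mod x 2 = 0 ∨ PySem.Int.mod x 2 = 1 := by
  have h0 := PySem.Int.mod_nonneg x (b := 2) (by norm_num)
  have h1 := PySem.Int.mod_lt x (b := 2) (by norm_num)
  omega

theorem loop_true_eq (xs : List Int) :
    correctOrderLoop xs true = decide (∀ y ∈ xs, PySem.Int.mod y 2 ≠ 0) := by
  induction xs with
  | nil => simp [correctOrderLoop]
  | cons x rest ih =>
    by_cases h : PySem.Int.mod x 2 ≠ 0
    · rw [correctOrderLoop, if_pos h, ih]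
      simp only [List.forall_mem_cons, decide_eq_decide]
      exact (and_iff_right h).symm
    · rw [correctOrderLoop, if_neg h, if_pos rfl]
      simp only [ne_eq, not_not] at h
      symm
      simp only [decide_eq_false_iff_not]
      intro hall
      exact hall x List.mem_cons_self h

theorem loop_false_eq (xs : List Int) :
    correctOrderLoop xs false
      = decide ((xs.map (fun x => PySem.Int.mod x 2)).Pairwise (· ≤ ·)) := by
  induction xs with
  | nil => simp [correctOrderLoop]
  | cons x rest ih =>
    by_cases h : PySem.Int.mod x 2 ≠ 0
    · have hx1 : PySem.Int.mod x 2 = 1 := by rcases pv_mod2_cases x with h0 | h1 <;> omega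
      rw [show correctOrderLoop (x :: rest) false = correctOrderLoop rest true from by
            rw [correctOrderLoop, if_pos h], loop_true_eq]
      simp only [List.map_cons, List.pairwise_cons, decide_eq_decide]
      constructor
      · intro hall
        constructor
        · intro b hb
          simp only [List.mem_map] at hb
          obtain ⟨y, hy, rfl⟩ := hb
          have := hall y hy
          rcases pv_mod2_cases y with h0 | h1 <;> omega
        · -- all parities are 1, so pairwise ≤ holds
          rw [List.pairwise_iff_forall_sublist]
          intro a b hs
          have ha : a ∈ rest.map (fun x => PySem.Int.mod x 2) := hs.subset (by simp)
          have hb : b ∈ rest.map (fun x => PySem.Int.mod x 2) := hs.subset (by simp)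
          simp only [List.mem_map] at ha hb
          obtain ⟨ya, hya, rfl⟩ := ha
          obtain ⟨yb, hyb, rfl⟩ := hb
          have h1 := hall ya hya
          have h2 := hall yb hyb
          rcases pv_mod2_cases ya with h0 | h0 <;> rcases pv_mod2_cases yb with h3 | h3 <;> omega
      · rintro ⟨hle, _⟩ y hy
        have := hle (PySem.Int.mod y 2) (List.mem_map.mpr ⟨y, hy, rfl⟩)
        rcases pv_mod2_cases y with h0 | h1 <;> omega
    · simp only [ne_eq, not_not] at h
      rw [show correctOrderLoop (x :: rest) false = correctOrderLoop rest false from by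
            rw [correctOrderLoop, if_neg (fun hc => hc h), if_neg (by simp)], ih]
      simp only [List.map_cons, List.pairwise_cons, decide_eq_decide, h]
      constructor
      · intro hp
        refine ⟨fun b hb => ?_, hp⟩
        simp only [List.mem_map] at hb
        obtain ⟨y, hy, rfl⟩ := hb
        have := PySem.Int.mod_nonneg y (b := 2) (by norm_num)
        omega
      · exact fun h => h.2

theorem alt_eq_pairwise (xs : List Int) :
    correct_order_alt xs
      = decide ((xs.map (fun x => PySem.Int.mod x 2)).Pairwise (· ≤ ·)) := by
  unfold correct_order_alt
  simp only [decide_eq_decide]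
  constructor
  · intro h
    rw [h]
    exact PySem.List.sorted_pairwise _ _
  · intro h
    exact (PySem.List.sorted_eq_self_of_pairwise _ _ h).symm

-- ===== VERDICT (by name: the statement is the Claim_ definition above) =====
theorem correct_order_spec : Claim_equal_correct_order := by
  intro xs _
  show correct_order xs = correct_order_alt xs
  rw [correct_order, loop_false_eq, alt_eq_pairwise]
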